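-- pv_equiv track=rewrite | github.com/ericdipietro-collab/JobSearch | job_search_v6.py | _find_filtered_title_pattern_slice
-- ===== SOURCE A (Python) =====
-- from typing import Any, Dict, List, Optional, Tuple
--
-- def _find_filtered_title_pattern_slice(title_tokens: List[str], pattern_tokens: List[str]) -> Optional[List[str]]:
--     if not title_tokens or not pattern_tokens:
--         return None
--     plen = len(pattern_tokens)
--     for idx in range(len(title_tokens) - plen + 1):
--         candidate = title_tokens[idx: idx + plen]
--         if candidate == pattern_tokens:
--             return candidate
--     return None
-- ===== SOURCE B (Python) =====
-- from typing import List, Optional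
--
--
-- def _find_filtered_title_pattern_slice(title_tokens: List[str], pattern_tokens: List[str]) -> Optional[List[str]]:
--     if not title_tokens or not pattern_tokens:
--         return None
--     n, m = len(title_tokens), len(pattern_tokens)
--     # candidate start positions where the first pattern token matches
--     candidates = [i for i in range(n - m + 1) if title_tokens[i] == pattern_tokens[0]]
--     # refine the candidate set one pattern position at a time
--     for j in range(1, m):
--         tok = pattern_tokens[j]
--         candidates = [i for i in candidates if title_tokens[i + j] == tok]
--         if not candidates:
--             return None
--     return list(pattern_tokens) if candidates else None
-- ===== Notes on version B (the rewrite author's own statement) =====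
-- stated objective: alternative
-- what changed: A slides a window over the title and compares a fresh slice against the whole pattern at each index; B instead builds the list of candidate start positions from the first pattern token and refines it once per remaining pattern position, with an early exit when no candidate survives.
import Mathlib
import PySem

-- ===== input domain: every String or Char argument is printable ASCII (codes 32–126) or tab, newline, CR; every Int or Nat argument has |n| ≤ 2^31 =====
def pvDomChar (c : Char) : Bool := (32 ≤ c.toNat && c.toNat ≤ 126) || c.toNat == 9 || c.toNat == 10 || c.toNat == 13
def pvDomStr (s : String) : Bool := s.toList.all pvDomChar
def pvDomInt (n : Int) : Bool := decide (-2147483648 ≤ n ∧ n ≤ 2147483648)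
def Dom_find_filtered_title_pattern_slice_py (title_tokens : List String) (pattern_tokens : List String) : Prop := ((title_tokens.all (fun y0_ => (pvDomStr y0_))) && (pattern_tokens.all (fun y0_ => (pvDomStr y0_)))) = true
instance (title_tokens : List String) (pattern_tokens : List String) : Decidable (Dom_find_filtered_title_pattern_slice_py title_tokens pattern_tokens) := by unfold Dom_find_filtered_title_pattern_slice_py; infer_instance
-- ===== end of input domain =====

-- B replaces A's slide-a-window-and-compare-slices scan with an iterative refinement of the
-- set of candidate start positions, one pattern position at a time (objective: alternative).

-- ===== PORT A =====
-- the `for idx in range(...)` loop with its early `return candidate`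
def pvALoop (title_tokens pattern_tokens : List String) : List Int → Option (List String)
  | [] => none
  | i :: rest =>
      let candidate := PySem.List.slice title_tokens (some i) (some (i + (pattern_tokens.length : Int)))
      if candidate = pattern_tokens then some candidate
      else pvALoop title_tokens pattern_tokens rest

def find_filtered_title_pattern_slice_py (title_tokens : List String) (pattern_tokens : List String) : Option (List String) :=
  if title_tokens = [] ∨ pattern_tokens = [] then none
  else
    pvALoop title_tokens pattern_tokens
      (PySem.List.pyRange 0 ((title_tokens.length : Int) - (pattern_tokens.length : Int) + 1))

-- ===== PORT B =====
-- the `for j in range(1, m)` refinement loop; `pattern_tokens[j]` and `title_tokens[i + j]`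
-- are in range by construction, so `(pyGet? … ).getD ""` / `pyGet? … == some tok` are exact
def pvBLoop (title_tokens pattern_tokens : List String) : List Int → List Int → Option (List String)
  | [], cands => if cands = [] then none else some pattern_tokens
  | j :: rest, cands =>
      let tok := (PySem.List.pyGet? pattern_tokens j).getD ""
      let cands' := cands.filter (fun i => PySem.List.pyGet? title_tokens (i + j) == some tok)
      if cands' = [] then none
      else pvBLoop title_tokens pattern_tokens rest cands'

def find_filtered_title_pattern_slice_py_alt (title_tokens : List String) (pattern_tokens : List String) : Option (List String) :=
  if title_tokens = [] ∨ pattern_tokens = [] then none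
  else
    let first := (PySem.List.pyGet? pattern_tokens 0).getD ""
    let candidates := (PySem.List.pyRange 0 ((title_tokens.length : Int) - (pattern_tokens.length : Int) + 1)).filter
        (fun i => PySem.List.pyGet? title_tokens i == some first)
    pvBLoop title_tokens pattern_tokens (PySem.List.pyRange 1 (pattern_tokens.length : Int)) candidates

-- ===== PRECONDITION & SPEC =====
def Spec_find_filtered_title_pattern_slice_py (title_tokens : List String) (pattern_tokens : List String) (out : Option (List String)) : Prop := out = find_filtered_title_pattern_slice_py_alt title_tokens pattern_tokens
instance (title_tokens : List String) (pattern_tokens : List String) (out : Option (List String)) : Decidable (Spec_find_filtered_title_pattern_slice_py title_tokens pattern_tokens out) := by unfold Spec_find_filtered_title_pattern_slice_py; infer_instance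

-- ===== CLAIM (what is proved, stated in full; the proofs are below) =====
def Claim_equal_find_filtered_title_pattern_slice_py : Prop := ∀ (title_tokens : List String) (pattern_tokens : List String), Dom_find_filtered_title_pattern_slice_py title_tokens pattern_tokens → Spec_find_filtered_title_pattern_slice_py title_tokens pattern_tokens (find_filtered_title_pattern_slice_py title_tokens pattern_tokens)

-- ===== LEMMAS AND PROOFS =====

-- A's loop returns `some pattern_tokens` at the first matching index, else `none`
lemma pvALoop_eq (t p : List String) (l : List Int) :
    pvALoop t p l =
      if ∃ i ∈ l, PySem.List.slice t (some i) (some (i + (p.length : Int))) = p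
      then some p else none := by
  induction l with
  | nil => simp [pvALoop]
  | cons i rest ih =>
      simp only [pvALoop, ih]
      by_cases h : PySem.List.slice t (some i) (some (i + (p.length : Int))) = p
      · simp [h]
      · simp [h]

-- B's loop keeps exactly the candidates surviving every remaining filter
lemma pvBLoop_eq (t p : List String) (js cands : List Int) :
    pvBLoop t p js cands =
      if cands.filter (fun i => js.all
          (fun j => PySem.List.pyGet? t (i + j) == some ((PySem.List.pyGet? p j).getD ""))) = []
      then none else some p := by
  induction js generalizing cands with
  | nil => simp [pvBLoop]
  | cons j rest ih =>
      have key : cands.filter (fun i => PySem.List.pyGet? t (i + j) == some ((PySem.List.pyGet? p j).getD "") &&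
            rest.all (fun j' => PySem.List.pyGet? t (i + j') == some ((PySem.List.pyGet? p j').getD ""))) =
          (cands.filter (fun i => PySem.List.pyGet? t (i + j) == some ((PySem.List.pyGet? p j).getD ""))).filter
            (fun i => rest.all (fun j' => PySem.List.pyGet? t (i + j') == some ((PySem.List.pyGet? p j').getD ""))) := by
        rw [List.filter_filter]
        apply List.filter_congr; intro i _; exact (Bool.and_comm _ _).symm
      simp only [pvBLoop, ih, List.all_cons, key]
      by_cases h : cands.filter (fun i => PySem.List.pyGet? t (i + j) == some ((PySem.List.pyGet? p j).getD "")) = []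
      · simp [h]
      · simp [h]

-- generic: a take-prefix equals p iff all entries agree
lemma take_eq_iff {α : Type} (u p : List α) :
    u.take p.length = p ↔ ∀ j < p.length, u[j]? = p[j]? := by
  constructor
  · intro h j hj
    have := congrArg (fun l => l[j]?) h
    simpa [hj] using this
  · intro h
    apply List.ext_getElem?
    intro j
    by_cases hj : j < p.length
    · simpa [List.getElem?_take, hj] using h j hj
    · simp [hj]

-- one refinement test, read off as agreement of one pair of entries
lemma cell_iff (t p : List String) (k jn : Nat) (hk : k + p.length ≤ t.length) (hjn : jn < p.length) :
    ((PySem.List.pyGet? t ((k : Int) + (jn : Int)) == some ((PySem.List.pyGet? p (jn : Int)).getD "")) = true)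
      ↔ (t.drop k)[jn]? = p[jn]? := by
  have h1 : ((k : Int) + (jn : Int)) = ((k + jn : Nat) : Int) := by push_cast; ring
  have ht : k + jn < t.length := by omega
  rw [h1, PySem.List.pyGet?_natCast, PySem.List.pyGet?_natCast, List.getElem?_drop,
      List.getElem?_eq_getElem ht, List.getElem?_eq_getElem hjn]
  simp

-- the pointwise bridge: A's slice comparison = B's first-token test + refinement tests
lemma bridge (t p : List String) (hp : p ≠ []) (i : Int) (h0 : 0 ≤ i)
    (h1 : i < (t.length : Int) - (p.length : Int) + 1) :
    (PySem.List.slice t (some i) (some (i + (p.length : Int))) = p) ↔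
      ((PySem.List.pyGet? t i == some ((PySem.List.pyGet? p 0).getD "")) = true ∧
       ∀ j ∈ PySem.List.pyRange 1 (p.length : Int),
         (PySem.List.pyGet? t (i + j) == some ((PySem.List.pyGet? p j).getD "")) = true) := by
  obtain ⟨k, rfl⟩ : ∃ k : Nat, i = (k : Int) := ⟨i.toNat, (Int.toNat_of_nonneg h0).symm⟩
  have hm : 0 < p.length := List.length_pos_iff.mpr hp
  have hkm : k + p.length ≤ t.length := by omega
  have hslice : PySem.List.slice t (some (k : Int)) (some ((k : Int) + (p.length : Int)))
      = (t.drop k).take p.length := by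
    have hc : ((k : Int) + (p.length : Int)) = ((k + p.length : Nat) : Int) := by push_cast; ring
    rw [hc, PySem.List.slice_natCast]
    congr 1
    omega
  rw [hslice, take_eq_iff]
  constructor
  · intro h
    refine ⟨?_, ?_⟩
    · have c := (cell_iff t p k 0 hkm hm).mpr (h 0 hm)
      simpa using c
    · intro j hj
      rw [PySem.List.mem_pyRange_one] at hj
      obtain ⟨hj1, hj2⟩ := hj
      obtain ⟨jn, rfl⟩ : ∃ jn : Nat, j = (jn : Int) := ⟨j.toNat, (Int.toNat_of_nonneg (by omega)).symm⟩
      have hjn : jn < p.length := by exact_mod_cast hj2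
      exact (cell_iff t p k jn hkm hjn).mpr (h jn hjn)
  · rintro ⟨c0, call⟩ jn hjn
    rcases Nat.eq_zero_or_pos jn with h | h
    · subst h
      apply (cell_iff t p k 0 hkm hm).mp
      simpa using c0
    · apply (cell_iff t p k jn hkm hjn).mp
      apply call
      rw [PySem.List.mem_pyRange_one]
      constructor
      · exact_mod_cast h
      · exact_mod_cast hjn

-- ===== VERDICT (by name: the statement is the Claim_ definition above) =====
theorem find_filtered_title_pattern_slice_py_spec : Claim_equal_find_filtered_title_pattern_slice_py := by
  intro t p _
  unfold Spec_find_filtered_title_pattern_slice_py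
  by_cases hg : t = [] ∨ p = []
  · simp [find_filtered_title_pattern_slice_py, find_filtered_title_pattern_slice_py_alt, hg]
  · obtain ⟨ht, hp⟩ := not_or.mp hg
    rw [find_filtered_title_pattern_slice_py, find_filtered_title_pattern_slice_py_alt,
        if_neg (by tauto), if_neg (by tauto)]
    rw [pvALoop_eq, pvBLoop_eq]
    have key : ((PySem.List.pyRange 0 ((t.length : Int) - (p.length : Int) + 1)).filter
          (fun i => PySem.List.pyGet? t i == some ((PySem.List.pyGet? p 0).getD ""))).filter
          (fun i => (PySem.List.pyRange 1 (p.length : Int)).all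
            (fun j => PySem.List.pyGet? t (i + j) == some ((PySem.List.pyGet? p j).getD ""))) =
        (PySem.List.pyRange 0 ((t.length : Int) - (p.length : Int) + 1)).filter
          (fun i => PySem.List.pyGet? t i == some ((PySem.List.pyGet? p 0).getD "") &&
            (PySem.List.pyRange 1 (p.length : Int)).all
              (fun j => PySem.List.pyGet? t (i + j) == some ((PySem.List.pyGet? p j).getD ""))) := by
      rw [List.filter_filter]
      apply List.filter_congr; intro i _; exact Bool.and_comm _ _
    rw [key]
    have hiff : (∃ i ∈ PySem.List.pyRange 0 ((t.length : Int) - (p.length : Int) + 1),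
          PySem.List.slice t (some i) (some (i + (p.length : Int))) = p) ↔
        ¬ (PySem.List.pyRange 0 ((t.length : Int) - (p.length : Int) + 1)).filter
          (fun i => PySem.List.pyGet? t i == some ((PySem.List.pyGet? p 0).getD "") &&
            (PySem.List.pyRange 1 (p.length : Int)).all
              (fun j => PySem.List.pyGet? t (i + j) == some ((PySem.List.pyGet? p j).getD ""))) = [] := by
      rw [← ne_eq, ← List.isEmpty_eq_false_iff, List.isEmpty_eq_false_iff_exists_mem]
      constructor
      · rintro ⟨i, hi, hsl⟩
        refine ⟨i, List.mem_filter.mpr ⟨hi, ?_⟩⟩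
        rw [PySem.List.mem_pyRange_one] at hi
        have hb := (bridge t p hp i hi.1 hi.2).mp hsl
        simp only [Bool.and_eq_true]
        exact ⟨hb.1, List.all_eq_true.mpr (fun j hj => hb.2 j hj)⟩
      · rintro ⟨i, hi⟩
        obtain ⟨hi, hcond⟩ := List.mem_filter.mp hi
        refine ⟨i, hi, ?_⟩
        rw [PySem.List.mem_pyRange_one] at hi
        simp only [Bool.and_eq_true] at hcond
        exact (bridge t p hp i hi.1 hi.2).mpr ⟨hcond.1, fun j hj => List.all_eq_true.mp hcond.2 j hj⟩
    by_cases hE : ∃ i ∈ PySem.List.pyRange 0 ((t.length : Int) - (p.length : Int) + 1),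
        PySem.List.slice t (some i) (some (i + (p.length : Int))) = p
    · rw [if_pos hE, if_neg (hiff.mp hE)]
    · rw [if_neg hE, if_pos (by by_contra hc; exact hE (hiff.mpr hc))]
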